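-- pv_equiv track=rewrite | github.com/valerio-lorenti-ai/verifoto-dl | codice_google_colab.py | group_near_duplicates
-- ===== SOURCE A (Python) =====
-- from typing import List, Tuple, Dict, Optional
--
-- def hamming(a: int, b: int) -> int:
--     return (a ^ b).bit_count()
--
-- def group_near_duplicates(paths: List[str], hashes: Dict[str, int], max_hamming: int = 4) -> Dict[int, List[str]]:
--     valid = [p for p in paths if hashes.get(p) is not None]
--     used = set()
--     groups = {}
--     gid = 0
--     for i, p in enumerate(valid):
--         if p in used:
--             continue
--         used.add(p)
--         groups[gid] = [p]
--         hp = hashes[p]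
--         for q in valid[i+1:]:
--             if q in used:
--                 continue
--             hq = hashes[q]
--             if hamming(hp, hq) <= max_hamming:
--                 used.add(q)
--                 groups[gid].append(q)
--         gid += 1
--     for p in paths:
--         if hashes.get(p) is None:
--             groups[gid] = [p]
--             gid += 1
--     return groups
-- ===== SOURCE B (Python) =====
-- from typing import List, Dict
--
-- def hamming(a: int, b: int) -> int:
--     return (a ^ b).bit_count()
--
-- def group_near_duplicates(paths: List[str], hashes: Dict[str, int], max_hamming: int = 4) -> Dict[int, List[str]]:
--     # Dedup the hashed paths up front (later duplicates can never reach the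
--     # output) and fetch each hash once; then cluster by repeatedly splitting a
--     # shrinking worklist of (path, hash) pairs: head seeds a group, close items
--     # join it, far items remain pending.
--     pending = []
--     seen = set()
--     for p in paths:
--         h = hashes.get(p)
--         if h is not None and p not in seen:
--             seen.add(p)
--             pending.append((p, h))
--     groups = {}
--     gid = 0
--     while pending:
--         (p, hp), rest = pending[0], pending[1:]
--         groups[gid] = [p] + [q for q, hq in rest if hamming(hp, hq) <= max_hamming]
--         pending = [(q, hq) for q, hq in rest if hamming(hp, hq) > max_hamming]
--         gid += 1
--     for p in paths:
--         if hashes.get(p) is None: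
--             groups[gid] = [p]
--             gid += 1
--     return groups
-- ===== Notes on version B (the rewrite author's own statement) =====
-- stated objective: alternative
-- what changed: B dedups the hashed paths up front (later duplicates never reach A's output) and fetches each hash once, then clusters by repeatedly partitioning a shrinking worklist of (path, hash) pairs - head seeds a group, close items join it, far items stay pending - instead of A's index loop over the full list with a global used-set and repeated dict lookups.
import Mathlib
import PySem

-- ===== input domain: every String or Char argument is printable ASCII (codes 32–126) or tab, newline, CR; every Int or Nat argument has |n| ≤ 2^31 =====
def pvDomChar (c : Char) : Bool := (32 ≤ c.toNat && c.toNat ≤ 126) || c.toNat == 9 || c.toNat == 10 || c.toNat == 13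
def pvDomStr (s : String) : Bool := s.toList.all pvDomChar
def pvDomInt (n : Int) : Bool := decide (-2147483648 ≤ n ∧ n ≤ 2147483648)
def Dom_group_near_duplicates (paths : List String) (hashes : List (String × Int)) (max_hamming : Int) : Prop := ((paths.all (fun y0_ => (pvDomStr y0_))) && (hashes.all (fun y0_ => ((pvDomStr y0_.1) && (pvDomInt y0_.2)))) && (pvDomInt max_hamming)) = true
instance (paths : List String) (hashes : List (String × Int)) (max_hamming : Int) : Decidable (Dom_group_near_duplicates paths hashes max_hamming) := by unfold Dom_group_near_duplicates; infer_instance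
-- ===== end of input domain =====

-- B dedups the hashed paths up front and clusters by repeatedly partitioning a shrinking
-- worklist of (path, hash) pairs, instead of A's index loop that rescans the whole suffix
-- against a global used-set; same return value (objective: alternative).

-- ===== PORT A =====
-- hamming(a, b) = (a ^ b).bit_count()  (shared module-level helper; Source B defines the same function)
def pyHamming (a b : Int) : Int := (PySem.Int.bitCount (PySem.Int.bxor a b) : Int)

-- body of A's inner 'for q in valid[i+1:]' loop (state: (used, groups))
def aInnerBody (hd : PySem.Dict String Int) (m : Int) (gid : Int) (hp : Int)
    (st2 : PySem.Set String × PySem.Dict Int (List String)) (q : String) :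
    PySem.Set String × PySem.Dict Int (List String) :=
  if PySem.Set.contains st2.1 q then st2
  else if pyHamming hp ((hd.get? q).getD 0) ≤ m then
    (PySem.Set.add st2.1 q, st2.2.modify gid [] (fun g => g ++ [q]))
  else st2

-- body of A's outer 'for i, p in enumerate(valid)' loop (state: (used, groups, gid))
def aOuterBody (hd : PySem.Dict String Int) (m : Int) (valid : List String)
    (st : PySem.Set String × PySem.Dict Int (List String) × Int) (ip : Int × String) :
    PySem.Set String × PySem.Dict Int (List String) × Int :=
  if PySem.Set.contains st.1 ip.2 then st
  else
    let used := PySem.Set.add st.1 ip.2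
    let hp := (hd.get? ip.2).getD 0   -- hashes[p]; p is in valid, so the key is present
    let inner := (PySem.List.slice valid (some (ip.1 + 1)) none).foldl
      (aInnerBody hd m st.2.2 hp) (used, (st.2.1).insert st.2.2 [ip.2])
    (inner.1, inner.2, st.2.2 + 1)

-- body of the final 'for p in paths' loop over unhashed paths (identical in A and B)
def missBody (hd : PySem.Dict String Int)
    (acc : PySem.Dict Int (List String) × Int) (p : String) :
    PySem.Dict Int (List String) × Int :=
  if (hd.get? p).isSome then acc else (acc.1.insert acc.2 [p], acc.2 + 1)

def group_near_duplicates (paths : List String) (hashes : List (String × Int)) (max_hamming : Int) : List (Int × List String) :=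
  let hd : PySem.Dict String Int := PySem.Dict.mk hashes
  let valid := paths.filter (fun p => (hd.get? p).isSome)
  let st := (PySem.List.enumerate valid).foldl (aOuterBody hd max_hamming valid)
    (PySem.Set.empty, PySem.Dict.empty, 0)
  let fin := paths.foldl (missBody hd) (st.2.1, st.2.2)
  fin.1.items

-- ===== PORT B =====
-- body of B's first loop: collect (path, hash) pairs, first occurrences only
def bSeenBody (hd : PySem.Dict String Int)
    (st : List (String × Int) × PySem.Set String) (p : String) :
    List (String × Int) × PySem.Set String :=
  match hd.get? p with
  | some h => if PySem.Set.contains st.2 p then st else (st.1 ++ [(p, h)], PySem.Set.add st.2 p)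
  | none => st

-- B's 'while pending' loop: head seeds a group, close items join, far items stay pending
def gndAltLoop (m : Int) : List (String × Int) → PySem.Dict Int (List String) → Int →
    PySem.Dict Int (List String) × Int
  | [], groups, gid => (groups, gid)
  | (p, hp) :: rest, groups, gid =>
      gndAltLoop m (rest.filter (fun q => m < pyHamming hp q.2))
        (groups.insert gid (p :: (rest.filter (fun q => pyHamming hp q.2 ≤ m)).map Prod.fst))
        (gid + 1)
  termination_by pending _ _ => pending.length
  decreasing_by simp; exact le_trans (List.length_filter_le _ _) (by simp)

def group_near_duplicates_alt (paths : List String) (hashes : List (String × Int)) (max_hamming : Int) : List (Int × List String) :=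
  let hd : PySem.Dict String Int := PySem.Dict.mk hashes
  let ps := paths.foldl (bSeenBody hd) ([], PySem.Set.empty)
  let mg := gndAltLoop max_hamming ps.1 PySem.Dict.empty 0
  let fin := paths.foldl (missBody hd) (mg.1, mg.2)
  fin.1.items

-- ===== PRECONDITION & SPEC =====
def Spec_group_near_duplicates (paths : List String) (hashes : List (String × Int)) (max_hamming : Int) (out : List (Int × List String)) : Prop := out = group_near_duplicates_alt paths hashes max_hamming
instance (paths : List String) (hashes : List (String × Int)) (max_hamming : Int) (out : List (Int × List String)) : Decidable (Spec_group_near_duplicates paths hashes max_hamming out) := by unfold Spec_group_near_duplicates; infer_instance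

-- ===== CLAIM (what is proved, stated in full; the proofs are below) =====
def Claim_equal_group_near_duplicates : Prop := ∀ (paths : List String) (hashes : List (String × Int)) (max_hamming : Int), Dom_group_near_duplicates paths hashes max_hamming → Spec_group_near_duplicates paths hashes max_hamming (group_near_duplicates paths hashes max_hamming)

-- ===== LEMMAS AND PROOFS =====

-- A's inner-loop picks: the q's appended to the seed's group, tracking the growing used-set
def picksF (m : Int) (H : String → Int) (hp : Int) : List String → List String → List String
  | [], _ => []
  | q :: l, S =>
    if PySem.Set.contains S q then picksF m H hp l S
    else if pyHamming hp (H q) ≤ m then q :: picksF m H hp l (PySem.Set.add S q)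
    else picksF m H hp l S

-- ordered dedup of a list relative to an already-seen set
def dF : List String → List String → List String
  | [], _ => []
  | p :: t, S => if PySem.Set.contains S p then dF t S else p :: dF t (PySem.Set.add S p)

-- the seen-set after that dedup
def dFS : List String → List String → List String
  | [], S => S
  | p :: t, S => if PySem.Set.contains S p then dFS t S else dFS t (PySem.Set.add S p)

def stepA (m : Int) (H : String → Int) (S : List String) (p : String) (t : List String) : List String :=
  PySem.Set.update (PySem.Set.add S p) (picksF m H (H p) t (PySem.Set.add S p))

-- A's outer loop, abstracted: the list of groups produced from suffix t with used-set S
def outA (m : Int) (H : String → Int) : List String → List String → List (List String)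
  | [], _ => []
  | p :: t, S =>
    if PySem.Set.contains S p then outA m H t S
    else (p :: picksF m H (H p) t (PySem.Set.add S p)) :: outA m H t (stepA m H S p t)

-- the used-set A's outer loop ends with
def usedA (m : Int) (H : String → Int) : List String → List String → List String
  | [], S => S
  | p :: t, S =>
    if PySem.Set.contains S p then usedA m H t S else usedA m H t (stepA m H S p t)

-- B's worklist loop, abstracted: just the group lists
def outB (m : Int) : List (String × Int) → List (List String)
  | [] => []
  | (p, hp) :: rest =>
    (p :: (rest.filter (fun q => pyHamming hp q.2 ≤ m)).map Prod.fst)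
      :: outB m (rest.filter (fun q => m < pyHamming hp q.2))
  termination_by pending => pending.length
  decreasing_by simp; exact le_trans (List.length_filter_le _ _) (by simp)

-- tag a list of groups with consecutive ids starting at g
def tagFrom (g : Int) : List (List String) → List (Int × List String)
  | [] => []
  | l :: ls => (g, l) :: tagFrom (g + 1) ls

theorem mem_contains_set (S : List String) (q : String) : PySem.Set.contains S q = true ↔ q ∈ S := by
  simp [PySem.Set.contains]

theorem mem_update_set (S : List String) (l : List String) (q : String) :
    q ∈ PySem.Set.update S l ↔ q ∈ S ∨ q ∈ l := by
  induction l generalizing S with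
  | nil => simp [PySem.Set.update]
  | cons x l ih =>
    simp only [PySem.Set.update, List.foldl_cons] at *
    rw [ih (PySem.Set.add S x)]
    simp [PySem.Set.mem_add]
    tauto

theorem picks_close (m : Int) (H : String → Int) (hp : Int) (t : List String) :
    ∀ S q, q ∈ picksF m H hp t S → pyHamming hp (H q) ≤ m := by
  induction t with
  | nil => intro S q h; simp [picksF] at h
  | cons r t ih =>
    intro S q h
    simp only [picksF] at h
    split at h
    · exact ih _ _ h
    · split at h
      · rcases List.mem_cons.mp h with h | h
        · subst h; assumption
        · exact ih _ _ h
      · exact ih _ _ h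

theorem picks_complete (m : Int) (H : String → Int) (hp : Int) (t : List String) :
    ∀ S q, q ∈ t → pyHamming hp (H q) ≤ m → q ∈ S ∨ q ∈ picksF m H hp t S := by
  induction t with
  | nil => intro S q h; simp at h
  | cons r t ih =>
    intro S q hq hcl
    by_cases hS : r ∈ S
    · have hc : PySem.Set.contains S r = true := (mem_contains_set S r).mpr hS
      rcases List.mem_cons.mp hq with rfl | hq
      · exact Or.inl hS
      · simpa [picksF, hS] using ih S q hq hcl
    · have hc : PySem.Set.contains S r = false :=
        Bool.eq_false_iff.mpr (fun h => hS ((mem_contains_set S r).mp h))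
      rcases List.mem_cons.mp hq with rfl | hq
      · simp [picksF, hS, hcl]
      · by_cases hr : pyHamming hp (H r) ≤ m
        · simp only [picksF, hc, Bool.false_eq_true, if_false, if_pos hr]
          rcases ih (PySem.Set.add S r) q hq hcl with h | h
          · rcases (PySem.Set.mem_add S r q).mp h with h | rfl
            · exact Or.inl h
            · exact Or.inr (List.mem_cons_self ..)
          · exact Or.inr (List.mem_cons_of_mem _ h)
        · simp only [picksF, hc, Bool.false_eq_true, if_false, if_neg hr]
          exact ih S q hq hcl

-- A's inner picks equal the close elements of the dedup, under the invariant that the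
-- dedup-set exceeds the picks-set only by far elements
theorem picks_eq_filter (m : Int) (H : String → Int) (hp : Int) (t : List String) :
    ∀ Sp Sd : List String,
      (∀ q, q ∈ Sp → q ∈ Sd) →
      (∀ q, q ∈ Sd → q ∈ Sp ∨ ¬ pyHamming hp (H q) ≤ m) →
      picksF m H hp t Sp = (dF t Sd).filter (fun q => pyHamming hp (H q) ≤ m) := by
  induction t with
  | nil => intro Sp Sd _ _; simp [picksF, dF]
  | cons q t ih =>
    intro Sp Sd hsub hfar
    by_cases hd : q ∈ Sd
    · have hcd : PySem.Set.contains Sd q = true := (mem_contains_set _ _).mpr hd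
      have hrec : picksF m H hp (q :: t) Sp = picksF m H hp t Sp := by
        rcases hfar q hd with hmem | hfarq
        · simp [picksF, hmem]
        · by_cases hps : q ∈ Sp
          · simp [picksF, hps]
          · have hcp : PySem.Set.contains Sp q = false :=
              Bool.eq_false_iff.mpr (fun h => hps ((mem_contains_set _ _).mp h))
            simp [picksF, hps, hfarq]
      rw [hrec, ih Sp Sd hsub hfar]
      simp [dF, hd]
    · have hcd : PySem.Set.contains Sd q = false :=
        Bool.eq_false_iff.mpr (fun h => hd ((mem_contains_set _ _).mp h))
      have hps : q ∉ Sp := fun h => hd (hsub q h)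
      have hcp : PySem.Set.contains Sp q = false :=
        Bool.eq_false_iff.mpr (fun h => hps ((mem_contains_set _ _).mp h))
      by_cases hcl : pyHamming hp (H q) ≤ m
      · simp only [picksF, dF, hcp, hcd, Bool.false_eq_true, if_false, if_pos hcl,
          List.filter_cons]
        rw [ih (PySem.Set.add Sp q) (PySem.Set.add Sd q)
          (fun r hr => by
            rcases (PySem.Set.mem_add _ _ _).mp hr with h | rfl
            · exact (PySem.Set.mem_add _ _ _).mpr (Or.inl (hsub r h))
            · exact (PySem.Set.mem_add _ _ _).mpr (Or.inr rfl))
          (fun r hr => by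
            rcases (PySem.Set.mem_add _ _ _).mp hr with h | rfl
            · rcases hfar r h with h2 | h2
              · exact Or.inl ((PySem.Set.mem_add _ _ _).mpr (Or.inl h2))
              · exact Or.inr h2
            · exact Or.inl ((PySem.Set.mem_add _ _ _).mpr (Or.inr rfl)))]
        simp [hcl]
      · simp only [picksF, dF, hcp, hcd, Bool.false_eq_true, if_false, if_neg hcl,
          List.filter_cons]
        rw [ih Sp (PySem.Set.add Sd q)
          (fun r hr => (PySem.Set.mem_add _ _ _).mpr (Or.inl (hsub r hr)))
          (fun r hr => by
            rcases (PySem.Set.mem_add _ _ _).mp hr with h | rfl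
            · exact hfar r h
            · exact Or.inr hcl)]
        simp [hcl]

theorem dF_superset_eq_filter (m : Int) (H : String → Int) (hp : Int) (t : List String) :
    ∀ S S2 : List String,
      (∀ q, q ∈ S → q ∈ S2) →
      (∀ q, q ∈ S2 → q ∈ S ∨ pyHamming hp (H q) ≤ m) →
      (∀ q, q ∈ t → pyHamming hp (H q) ≤ m → q ∉ S → q ∈ S2) →
      dF t S2 = (dF t S).filter (fun q => m < pyHamming hp (H q)) := by
  induction t with
  | nil => intro S S2 _ _ _; simp [dF]
  | cons q t ih =>
    intro S S2 h1 h2 h3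
    have h3t : ∀ r, r ∈ t → pyHamming hp (H r) ≤ m → r ∉ S → r ∈ S2 :=
      fun r hr => h3 r (List.mem_cons_of_mem _ hr)
    by_cases hqS : q ∈ S
    · have hqS2 : q ∈ S2 := h1 q hqS
      simp only [dF, (mem_contains_set _ _).mpr hqS, (mem_contains_set _ _).mpr hqS2, if_true]
      exact ih S S2 h1 h2 h3t
    · have hcS : PySem.Set.contains S q = false :=
        Bool.eq_false_iff.mpr (fun h => hqS ((mem_contains_set _ _).mp h))
      by_cases hqS2 : q ∈ S2
      · have hcl : pyHamming hp (H q) ≤ m := (h2 q hqS2).resolve_left hqS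
        simp only [dF, (mem_contains_set _ _).mpr hqS2, if_true, hcS, Bool.false_eq_true,
          if_false, List.filter_cons]
        rw [ih (PySem.Set.add S q) S2
          (fun r hr => by
            rcases (PySem.Set.mem_add _ _ _).mp hr with h | rfl
            · exact h1 r h
            · exact hqS2)
          (fun r hr => by
            rcases h2 r hr with h | h
            · exact Or.inl ((PySem.Set.mem_add _ _ _).mpr (Or.inl h))
            · exact Or.inr h)
          (fun r hr hcl2 hns => h3t r hr hcl2
            (fun h => hns ((PySem.Set.mem_add _ _ _).mpr (Or.inl h))))]
        simp [not_lt.mpr hcl]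
      · have hcS2 : PySem.Set.contains S2 q = false :=
          Bool.eq_false_iff.mpr (fun h => hqS2 ((mem_contains_set _ _).mp h))
        have hfarq : ¬ pyHamming hp (H q) ≤ m :=
          fun hc => hqS2 (h3 q (List.mem_cons_self ..) hc hqS)
        simp only [dF, hcS, hcS2, Bool.false_eq_true, if_false, List.filter_cons]
        rw [ih (PySem.Set.add S q) (PySem.Set.add S2 q)
          (fun r hr => by
            rcases (PySem.Set.mem_add _ _ _).mp hr with h | rfl
            · exact (PySem.Set.mem_add _ _ _).mpr (Or.inl (h1 r h))
            · exact (PySem.Set.mem_add _ _ _).mpr (Or.inr rfl))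
          (fun r hr => by
            rcases (PySem.Set.mem_add _ _ _).mp hr with h | rfl
            · rcases h2 r h with h2' | h2'
              · exact Or.inl ((PySem.Set.mem_add _ _ _).mpr (Or.inl h2'))
              · exact Or.inr h2'
            · exact Or.inl ((PySem.Set.mem_add _ _ _).mpr (Or.inr rfl)))
          (fun r hr hcl2 hns => by
            have : r ∉ S := fun h => hns ((PySem.Set.mem_add _ _ _).mpr (Or.inl h))
            exact (PySem.Set.mem_add _ _ _).mpr (Or.inl (h3t r hr hcl2 this)))]
        simp [not_le.mp hfarq]

theorem dF_stepA (m : Int) (H : String → Int) (S : List String) (p : String) (t : List String) :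
    dF t (stepA m H S p t)
      = (dF t (PySem.Set.add S p)).filter (fun q => m < pyHamming (H p) (H q)) := by
  apply dF_superset_eq_filter m H (H p) t (PySem.Set.add S p) (stepA m H S p t)
  · intro q hq
    exact (mem_update_set _ _ _).mpr (Or.inl hq)
  · intro q hq
    rcases (mem_update_set _ _ _).mp hq with h | h
    · exact Or.inl h
    · exact Or.inr (picks_close m H (H p) t _ q h)
  · intro q hq hcl hns
    rcases picks_complete m H (H p) t (PySem.Set.add S p) q hq hcl with h | h
    · exact absurd h hns
    · exact (mem_update_set _ _ _).mpr (Or.inr h)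

theorem outA_eq_outB (m : Int) (H : String → Int) (s : List String) :
    ∀ S : List String, outA m H s S = outB m ((dF s S).map (fun p => (p, H p))) := by
  induction s with
  | nil => intro S; simp [outA, dF, outB]
  | cons p t ih =>
    intro S
    by_cases hS : p ∈ S
    · have hc : PySem.Set.contains S p = true := (mem_contains_set _ _).mpr hS
      simp only [outA, dF, hc, if_true]
      exact ih S
    · have hc : PySem.Set.contains S p = false :=
        Bool.eq_false_iff.mpr (fun h => hS ((mem_contains_set _ _).mp h))
      simp only [outA, dF, hc, Bool.false_eq_true, if_false, List.map_cons]
      rw [outB]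
      refine congrArg₂ List.cons ?_ ?_
      · refine congrArg (List.cons p) ?_
        rw [List.filter_map]
        have hcomp : ((fun q : String × Int => decide (pyHamming (H p) q.2 ≤ m))
            ∘ (fun r => (r, H r))) = (fun r => decide (pyHamming (H p) (H r) ≤ m)) := rfl
        rw [hcomp,
          picks_eq_filter m H (H p) t (PySem.Set.add S p) (PySem.Set.add S p)
            (fun q h => h) (fun q h => Or.inl h)]
        have hid : (Prod.fst ∘ fun r : String => (r, H r)) = id := rfl
        rw [List.map_map, hid, List.map_id]
      · rw [List.filter_map]
        have hcomp : ((fun q : String × Int => decide (m < pyHamming (H p) q.2))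
            ∘ (fun r => (r, H r))) = (fun r => decide (m < pyHamming (H p) (H r))) := rfl
        rw [hcomp, ← dF_stepA m H S p t]
        exact ih (stepA m H S p t)

theorem insert_fresh (I : List (Int × List String)) (g : Int) (v : List String)
    (h : ∀ p ∈ I, p.1 ≠ g) :
    (PySem.Dict.mk I).insert g v = PySem.Dict.mk (I ++ [(g, v)]) := by
  have hc : (PySem.Dict.mk I).contains g = false := by
    rw [PySem.Dict.contains_mk]
    simp only [List.any_eq_false]
    intro p hp
    simpa using h p hp
  simp [PySem.Dict.insert, hc]

theorem modify_last (I : List (Int × List String)) (g : Int) (l0 : List String)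
    (f : List String → List String) (h : ∀ p ∈ I, p.1 ≠ g) :
    (PySem.Dict.mk (I ++ [(g, l0)])).modify g [] f = PySem.Dict.mk (I ++ [(g, f l0)]) := by
  have hfind : List.find? (fun p => p.1 == g) I = none :=
    List.find?_eq_none.mpr (fun p hp => by simpa using h p hp)
  have hget : (PySem.Dict.mk (I ++ [(g, l0)])).get? g = some l0 := by
    simp [PySem.Dict.get?, List.find?_append, hfind]
  have hc : (PySem.Dict.mk (I ++ [(g, l0)])).contains g = true := by
    rw [PySem.Dict.contains_mk]
    simp [List.any_append]
  simp only [PySem.Dict.modify, PySem.Dict.getD, hget, Option.getD_some, PySem.Dict.insert, hc,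
    if_true]
  congr 1
  rw [List.map_append]
  congr 1
  · exact List.map_congr_left (fun p hp => by simp [beq_false_of_ne (h p hp)]) |>.trans
      (List.map_id _)
  · simp

theorem append_singleton_tagFrom (I : List (Int × List String)) (g : Int) (x : List String)
    (X : List (List String)) :
    (I ++ [(g, x)]) ++ tagFrom (g + 1) X = I ++ tagFrom g (x :: X) := by
  simp [tagFrom]

theorem innerA_fold (hd : PySem.Dict String Int) (m gid hp : Int) (l : List String) :
    ∀ (S : List String) (I : List (Int × List String)) (l0 : List String),
      (∀ p ∈ I, p.1 ≠ gid) →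
      l.foldl (aInnerBody hd m gid hp) (S, PySem.Dict.mk (I ++ [(gid, l0)]))
        = (PySem.Set.update S (picksF m (fun p => (hd.get? p).getD 0) hp l S),
           PySem.Dict.mk (I ++ [(gid, l0 ++ picksF m (fun p => (hd.get? p).getD 0) hp l S)])) := by
  induction l with
  | nil => intro S I l0 _; simp [picksF, PySem.Set.update]
  | cons q l ih =>
    intro S I l0 h
    rw [List.foldl_cons]
    by_cases hq : q ∈ S
    · have hc : PySem.Set.contains S q = true := (mem_contains_set _ _).mpr hq
      simp only [aInnerBody, picksF, hc, if_true]
      exact ih S I l0 h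
    · have hc : PySem.Set.contains S q = false :=
        Bool.eq_false_iff.mpr (fun hx => hq ((mem_contains_set _ _).mp hx))
      by_cases hcl : pyHamming hp ((hd.get? q).getD 0) ≤ m
      · simp only [aInnerBody, picksF, hc, Bool.false_eq_true, if_false, if_pos hcl]
        rw [modify_last I gid l0 _ h, ih (PySem.Set.add S q) I (l0 ++ [q]) h]
        refine congrArg₂ Prod.mk rfl ?_
        simp [List.append_assoc]
      · simp only [aInnerBody, picksF, hc, Bool.false_eq_true, if_false, if_neg hcl]
        exact ih S I l0 h

theorem foldA_gen (hd : PySem.Dict String Int) (m : Int) (valid : List String) (t : List String) :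
    ∀ (jn : Nat) (S : List String) (I : List (Int × List String)) (gid : Int),
      List.drop jn valid = t →
      (∀ p ∈ I, p.1 < gid) →
      (PySem.List.enumerate t (jn : Int)).foldl (aOuterBody hd m valid) (S, PySem.Dict.mk I, gid)
        = (usedA m (fun p => (hd.get? p).getD 0) t S,
           PySem.Dict.mk (I ++ tagFrom gid (outA m (fun p => (hd.get? p).getD 0) t S)),
           gid + ((outA m (fun p => (hd.get? p).getD 0) t S).length : Int)) := by
  induction t with
  | nil => intro jn S I gid _ _; simp [PySem.List.enumerate_nil, usedA, outA, tagFrom]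
  | cons p t ih =>
    intro jn S I gid hdrop hkeys
    have hdrop' : List.drop (jn + 1) valid = t := by
      rw [← List.tail_drop, hdrop]; rfl
    rw [PySem.List.enumerate_cons, List.foldl_cons]
    have hcast : (jn : Int) + 1 = ((jn + 1 : Nat) : Int) := by push_cast; ring
    by_cases hp : p ∈ S
    · have hc : PySem.Set.contains S p = true := (mem_contains_set _ _).mpr hp
      simp only [aOuterBody, hc, if_true]
      rw [hcast, ih (jn + 1) S I gid hdrop' hkeys]
      simp only [usedA, outA, hc, if_true]
    · have hc : PySem.Set.contains S p = false :=
        Bool.eq_false_iff.mpr (fun hx => hp ((mem_contains_set _ _).mp hx))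
      simp only [aOuterBody, hc, Bool.false_eq_true, if_false]
      rw [hcast, PySem.List.slice_from_natCast, hdrop']
      rw [insert_fresh I gid [p] (fun r hr => ne_of_lt (hkeys r hr)),
        innerA_fold hd m gid ((hd.get? p).getD 0) t (PySem.Set.add S p) I [p]
          (fun r hr => ne_of_lt (hkeys r hr))]
      have hkeys' : ∀ r ∈ I ++ [(gid, [p] ++ picksF m (fun p => (hd.get? p).getD 0)
          ((hd.get? p).getD 0) t (PySem.Set.add S p))], r.1 < gid + 1 := by
        intro r hr
        rcases List.mem_append.mp hr with h | h
        · exact lt_trans (hkeys r h) (by omega)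
        · rw [List.mem_singleton] at h
          subst h
          exact lt_add_one gid
      rw [ih (jn + 1) _ _ (gid + 1) hdrop' hkeys']
      simp only [usedA, outA, hc, Bool.false_eq_true, if_false, stepA]
      refine congrArg₂ Prod.mk rfl (congrArg₂ Prod.mk ?_ ?_)
      · rw [append_singleton_tagFrom]
        simp
      · simp only [List.length_cons]
        push_cast
        ring

theorem gndAltLoop_eq (m : Int) :
    ∀ (n : Nat) (pend : List (String × Int)), pend.length ≤ n →
      ∀ (I : List (Int × List String)) (g : Int), (∀ p ∈ I, p.1 < g) →
      gndAltLoop m pend (PySem.Dict.mk I) g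
        = (PySem.Dict.mk (I ++ tagFrom g (outB m pend)), g + ((outB m pend).length : Int)) := by
  intro n
  induction n with
  | zero =>
    intro pend hlen I g _
    have : pend = [] := List.eq_nil_of_length_eq_zero (Nat.le_zero.mp hlen)
    subst this
    simp [gndAltLoop, outB, tagFrom]
  | succ n ih =>
    intro pend hlen I g hkeys
    match pend with
    | [] => simp [gndAltLoop, outB, tagFrom]
    | (p, hp) :: rest =>
      rw [gndAltLoop, outB]
      rw [insert_fresh I g _ (fun r hr => ne_of_lt (hkeys r hr))]
      have hlen' : (rest.filter (fun q => m < pyHamming hp q.2)).length ≤ n := by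
        have := List.length_filter_le (fun q => decide (m < pyHamming hp q.2)) rest
        simp only [List.length_cons] at hlen
        omega
      have hkeys' : ∀ r ∈ I ++ [(g, p :: (rest.filter
          (fun q => pyHamming hp q.2 ≤ m)).map Prod.fst)], r.1 < g + 1 := by
        intro r hr
        rcases List.mem_append.mp hr with h | h
        · exact lt_trans (hkeys r h) (by omega)
        · rw [List.mem_singleton] at h
          subst h
          exact lt_add_one g
      rw [ih _ hlen' _ (g + 1) hkeys']
      refine congrArg₂ Prod.mk ?_ ?_
      · rw [append_singleton_tagFrom]
      · simp only [List.length_cons]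
        push_cast
        ring

theorem bSeen_fold (hd : PySem.Dict String Int) (l : List String) :
    ∀ (acc : List (String × Int)) (S : List String),
      l.foldl (bSeenBody hd) (acc, S)
        = (acc ++ (dF (l.filter (fun p => (hd.get? p).isSome)) S).map
            (fun p => (p, (hd.get? p).getD 0)),
           dFS (l.filter (fun p => (hd.get? p).isSome)) S) := by
  induction l with
  | nil => intro acc S; simp [dF, dFS]
  | cons p l ih =>
    intro acc S
    rw [List.foldl_cons]
    by_cases hsome : (hd.get? p).isSome
    · obtain ⟨h, hg⟩ := Option.isSome_iff_exists.mp hsome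
      have hf : List.filter (fun r => (hd.get? r).isSome) (p :: l)
          = p :: List.filter (fun r => (hd.get? r).isSome) l := by
        simp [hsome]
      rw [hf]
      by_cases hp : p ∈ S
      · have hc : PySem.Set.contains S p = true := (mem_contains_set _ _).mpr hp
        have hb : bSeenBody hd (acc, S) p = (acc, S) := by
          simp [bSeenBody, hg, hp]
        rw [hb, ih acc S]
        simp only [dF, dFS, hc, if_true]
      · have hc : PySem.Set.contains S p = false :=
          Bool.eq_false_iff.mpr (fun hx => hp ((mem_contains_set _ _).mp hx))
        have hb : bSeenBody hd (acc, S) p = (acc ++ [(p, h)], PySem.Set.add S p) := by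
          simp [bSeenBody, hg, hp]
        rw [hb, ih (acc ++ [(p, h)]) (PySem.Set.add S p)]
        simp only [dF, dFS, hc, Bool.false_eq_true, if_false, List.map_cons]
        have hH : (p, (hd.get? p).getD 0) = (p, h) := by rw [hg]; rfl
        rw [hH]
        simp [List.append_assoc]
    · have hg : hd.get? p = none := Option.not_isSome_iff_eq_none.mp hsome
      have hb : bSeenBody hd (acc, S) p = (acc, S) := by
        simp [bSeenBody, hg]
      have hf : List.filter (fun r => (hd.get? r).isSome) (p :: l)
          = List.filter (fun r => (hd.get? r).isSome) l := by
        simp [hg]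
      rw [hb, hf, ih acc S]

theorem group_near_duplicates_eq (paths : List String) (hashes : List (String × Int)) (max_hamming : Int) :
    group_near_duplicates paths hashes max_hamming = group_near_duplicates_alt paths hashes max_hamming := by
  unfold group_near_duplicates group_near_duplicates_alt
  unfold PySem.Set.empty PySem.Dict.empty
  dsimp only
  have hA := foldA_gen (PySem.Dict.mk hashes) max_hamming
    (paths.filter (fun p => ((PySem.Dict.mk hashes).get? p).isSome))
    (paths.filter (fun p => ((PySem.Dict.mk hashes).get? p).isSome)) 0 [] [] 0 rfl
    (by intro p hp; simp at hp)
  have hB := bSeen_fold (PySem.Dict.mk hashes) paths [] []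
  simp only [Nat.cast_zero] at hA
  rw [hA, hB]
  simp only [List.nil_append]
  rw [gndAltLoop_eq max_hamming
    (((dF (paths.filter (fun p => ((PySem.Dict.mk hashes).get? p).isSome)) []).map
      (fun p => (p, ((PySem.Dict.mk hashes).get? p).getD 0))).length) _ le_rfl [] 0
    (by intro p hp; simp at hp)]
  rw [outA_eq_outB max_hamming (fun p => ((PySem.Dict.mk hashes).get? p).getD 0)
    (paths.filter (fun p => ((PySem.Dict.mk hashes).get? p).isSome)) []]
  simp only [List.nil_append]

-- ===== VERDICT (by name: the statement is the Claim_ definition above) =====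
theorem group_near_duplicates_spec : Claim_equal_group_near_duplicates := by
  intro paths hashes max_hamming _
  unfold Spec_group_near_duplicates
  exact group_near_duplicates_eq paths hashes max_hamming
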